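-- pv_equiv track=rewrite | github.com/calvinw/mcp-ui-servers | mcp-strudel/parse_samples.py | categorize_sample
-- ===== SOURCE A (Python) =====
-- def categorize_sample(name):
--     """Categorize samples by instrument type."""
--
--     # Define categories based on instrument families
--     categories = {
--         'Percussion': [
--             'agogo', 'anvil', 'ballwhistle', 'bassdrum1', 'bassdrum2', 'belltree', 'bongo',
--             'brakedrum', 'cabasa', 'cajon', 'clap', 'clash', 'clash2', 'clave', 'conga',
--             'cowbell', 'darbuka', 'fingercymbal', 'flexatone', 'framedrum', 'gong', 'gong2',
--             'guiro', 'handbells', 'handchimes', 'marktrees', 'ratchet', 'shaker_large',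
--             'shaker_small', 'siren', 'slapstick', 'sleighbells', 'slitdrum', 'snare_hi',
--             'snare_low', 'snare_modern', 'snare_rim', 'sus_cymbal', 'sus_cymbal2', 'tambourine',
--             'tambourine2', 'timpani', 'timpani_roll', 'timpani2', 'tom_mallet', 'tom_rim',
--             'tom_stick', 'tom2_mallet', 'tom2_rim', 'tom2_stick', 'trainwhistle', 'triangles',
--             'tubularbells', 'tubularbells2', 'vibraslap', 'woodblock'
--         ],
--         'Mallet Instruments': [
--             'balafon', 'balafon_hard', 'balafon_soft', 'glockenspiel', 'kalimba', 'kalimba2',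
--             'kalimba3', 'kalimba4', 'kalimba5', 'marimba', 'vibraphone', 'vibraphone_bowed',
--             'vibraphone_soft', 'xylophone_hard_ff', 'xylophone_hard_pp', 'xylophone_medium_ff',
--             'xylophone_medium_pp', 'xylophone_soft_ff', 'xylophone_soft_pp'
--         ],
--         'Keyboards': [
--             'casio', 'clavisynth', 'fmpiano', 'kawai', 'piano', 'piano1', 'steinway'
--         ],
--         'Organs': [
--             'organ_4inch', 'organ_8inch', 'organ_full', 'pipeorgan_loud', 'pipeorgan_loud_pedal',
--             'pipeorgan_quiet', 'pipeorgan_quiet_pedal'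
--         ],
--         'Strings': [
--             'folkharp', 'harp', 'psaltery_bow', 'psaltery_pluck', 'psaltery_spiccato', 'strumstick'
--         ],
--         'Wind Instruments': [
--             'didgeridoo', 'harmonica', 'harmonica_soft', 'harmonica_vib', 'ocarina', 'ocarina_small',
--             'ocarina_small_stacc', 'ocarina_vib', 'recorder_alto_stacc', 'recorder_alto_sus',
--             'recorder_alto_vib', 'recorder_bass_stacc', 'recorder_bass_sus', 'recorder_bass_vib',
--             'recorder_soprano_stacc', 'recorder_soprano_sus', 'recorder_tenor_stacc',
--             'recorder_tenor_sus', 'recorder_tenor_vib', 'sax', 'sax_stacc', 'sax_vib', 'saxello',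
--             'saxello_stacc', 'saxello_vib'
--         ],
--         'Ethnic/World': [
--             'dantranh', 'dantranh_tremolo', 'dantranh_vibrato', 'east'
--         ],
--         'Electronic/Synth': [
--             'super64', 'super64_acc', 'super64_vib'
--         ],
--         'Sound Effects': [
--             'crow', 'insect', 'oceandrum', 'space', 'wind', 'wineglass', 'wineglass_slow'
--         ],
--         'Drum Kit': [
--             'hihat'
--         ],
--         'Misc': [
--             'jazz', 'metal', 'num', 'numbers'
--         ]
--     }
--
--     # Find which category the sample belongs to
--     for category, sample_list in categories.items():
--         if name in sample_list:
--             return category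
--
--     return 'Uncategorized'
-- ===== SOURCE B (Python) =====
-- # B: binary search over a sorted name index with a parallel category tuple (O(log n) lookups vs A's scan).
--
-- _NAMES = (
--     "agogo", "anvil", "balafon", "balafon_hard", "balafon_soft", "ballwhistle", "bassdrum1",
--     "bassdrum2", "belltree", "bongo", "brakedrum", "cabasa", "cajon", "casio", "clap", "clash",
--     "clash2", "clave", "clavisynth", "conga", "cowbell", "crow", "dantranh", "dantranh_tremolo",
--     "dantranh_vibrato", "darbuka", "didgeridoo", "east", "fingercymbal", "flexatone", "fmpiano",
--     "folkharp", "framedrum", "glockenspiel", "gong", "gong2", "guiro", "handbells", "handchimes",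
--     "harmonica", "harmonica_soft", "harmonica_vib", "harp", "hihat", "insect", "jazz", "kalimba",
--     "kalimba2", "kalimba3", "kalimba4", "kalimba5", "kawai", "marimba", "marktrees", "metal",
--     "num", "numbers", "ocarina", "ocarina_small", "ocarina_small_stacc", "ocarina_vib",
--     "oceandrum", "organ_4inch", "organ_8inch", "organ_full", "piano", "piano1", "pipeorgan_loud",
--     "pipeorgan_loud_pedal", "pipeorgan_quiet", "pipeorgan_quiet_pedal", "psaltery_bow",
--     "psaltery_pluck", "psaltery_spiccato", "ratchet", "recorder_alto_stacc", "recorder_alto_sus",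
--     "recorder_alto_vib", "recorder_bass_stacc", "recorder_bass_sus", "recorder_bass_vib",
--     "recorder_soprano_stacc", "recorder_soprano_sus", "recorder_tenor_stacc", "recorder_tenor_sus",
--     "recorder_tenor_vib", "sax", "sax_stacc", "sax_vib", "saxello", "saxello_stacc", "saxello_vib",
--     "shaker_large", "shaker_small", "siren", "slapstick", "sleighbells", "slitdrum", "snare_hi",
--     "snare_low", "snare_modern", "snare_rim", "space", "steinway", "strumstick", "super64",
--     "super64_acc", "super64_vib", "sus_cymbal", "sus_cymbal2", "tambourine", "tambourine2",
--     "timpani", "timpani2", "timpani_roll", "tom2_mallet", "tom2_rim", "tom2_stick", "tom_mallet",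
--     "tom_rim", "tom_stick", "trainwhistle", "triangles", "tubularbells", "tubularbells2",
--     "vibraphone", "vibraphone_bowed", "vibraphone_soft", "vibraslap", "wind", "wineglass",
--     "wineglass_slow", "woodblock", "xylophone_hard_ff", "xylophone_hard_pp", "xylophone_medium_ff",
--     "xylophone_medium_pp", "xylophone_soft_ff", "xylophone_soft_pp"
-- )
--
-- _CATS = (
--     "Percussion", "Percussion", "Mallet Instruments", "Mallet Instruments", "Mallet Instruments",
--     "Percussion", "Percussion", "Percussion", "Percussion", "Percussion", "Percussion",
--     "Percussion", "Percussion", "Keyboards", "Percussion", "Percussion", "Percussion",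
--     "Percussion", "Keyboards", "Percussion", "Percussion", "Sound Effects", "Ethnic/World",
--     "Ethnic/World", "Ethnic/World", "Percussion", "Wind Instruments", "Ethnic/World", "Percussion",
--     "Percussion", "Keyboards", "Strings", "Percussion", "Mallet Instruments", "Percussion",
--     "Percussion", "Percussion", "Percussion", "Percussion", "Wind Instruments", "Wind Instruments",
--     "Wind Instruments", "Strings", "Drum Kit", "Sound Effects", "Misc", "Mallet Instruments",
--     "Mallet Instruments", "Mallet Instruments", "Mallet Instruments", "Mallet Instruments",
--     "Keyboards", "Mallet Instruments", "Percussion", "Misc", "Misc", "Misc", "Wind Instruments",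
--     "Wind Instruments", "Wind Instruments", "Wind Instruments", "Sound Effects", "Organs",
--     "Organs", "Organs", "Keyboards", "Keyboards", "Organs", "Organs", "Organs", "Organs",
--     "Strings", "Strings", "Strings", "Percussion", "Wind Instruments", "Wind Instruments",
--     "Wind Instruments", "Wind Instruments", "Wind Instruments", "Wind Instruments",
--     "Wind Instruments", "Wind Instruments", "Wind Instruments", "Wind Instruments",
--     "Wind Instruments", "Wind Instruments", "Wind Instruments", "Wind Instruments",
--     "Wind Instruments", "Wind Instruments", "Wind Instruments", "Percussion", "Percussion",
--     "Percussion", "Percussion", "Percussion", "Percussion", "Percussion", "Percussion",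
--     "Percussion", "Percussion", "Sound Effects", "Keyboards", "Strings", "Electronic/Synth",
--     "Electronic/Synth", "Electronic/Synth", "Percussion", "Percussion", "Percussion", "Percussion",
--     "Percussion", "Percussion", "Percussion", "Percussion", "Percussion", "Percussion",
--     "Percussion", "Percussion", "Percussion", "Percussion", "Percussion", "Percussion",
--     "Percussion", "Mallet Instruments", "Mallet Instruments", "Mallet Instruments", "Percussion",
--     "Sound Effects", "Sound Effects", "Sound Effects", "Percussion", "Mallet Instruments",
--     "Mallet Instruments", "Mallet Instruments", "Mallet Instruments", "Mallet Instruments",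
--     "Mallet Instruments"
-- )
--
--
-- def categorize_sample(name):
--     """Categorize samples by instrument type."""
--     lo, hi = 0, len(_NAMES)
--     while lo < hi:
--         mid = (lo + hi) // 2
--         if _NAMES[mid] < name:
--             lo = mid + 1
--         else:
--             hi = mid
--     if lo < len(_NAMES) and _NAMES[lo] == name:
--         return _CATS[lo]
--     return 'Uncategorized'
-- ===== Notes on version B (the rewrite author's own statement) =====
-- stated objective: alternative
-- what changed: Replaces A's in-order scan of the category lists with a binary search over a pre-sorted name index and a parallel category tuple, so a lookup does O(log n) comparisons instead of scanning; correct because the sample names are unique across categories.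
import Mathlib
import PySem

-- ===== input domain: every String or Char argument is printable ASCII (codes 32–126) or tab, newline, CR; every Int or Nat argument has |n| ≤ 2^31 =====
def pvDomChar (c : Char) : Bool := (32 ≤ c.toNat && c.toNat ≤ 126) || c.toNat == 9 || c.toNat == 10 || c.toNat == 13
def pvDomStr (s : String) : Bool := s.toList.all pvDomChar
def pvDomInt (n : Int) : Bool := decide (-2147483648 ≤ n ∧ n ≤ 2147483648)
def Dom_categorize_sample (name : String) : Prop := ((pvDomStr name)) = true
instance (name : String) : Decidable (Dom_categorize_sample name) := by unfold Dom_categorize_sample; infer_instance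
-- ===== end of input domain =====

-- B replaces A's in-order scan of the category lists by a binary search over a sorted name index with a
-- parallel category table; objective: a different algorithm for the same lookup.

-- ===== PORT A =====
-- A's categories dict: category → list of sample names, in A's literal order.
def pvCats : List (String × List String) := [
  ("Percussion", ["agogo", "anvil", "ballwhistle", "bassdrum1", "bassdrum2", "belltree", "bongo", "brakedrum", "cabasa", "cajon", "clap", "clash", "clash2", "clave", "conga", "cowbell", "darbuka", "fingercymbal", "flexatone", "framedrum", "gong", "gong2", "guiro", "handbells", "handchimes", "marktrees", "ratchet", "shaker_large", "shaker_small", "siren", "slapstick", "sleighbells", "slitdrum", "snare_hi", "snare_low", "snare_modern", "snare_rim", "sus_cymbal", "sus_cymbal2", "tambourine", "tambourine2", "timpani", "timpani_roll", "timpani2", "tom_mallet", "tom_rim", "tom_stick", "tom2_mallet", "tom2_rim", "tom2_stick", "trainwhistle", "triangles", "tubularbells", "tubularbells2", "vibraslap", "woodblock"]),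
  ("Mallet Instruments", ["balafon", "balafon_hard", "balafon_soft", "glockenspiel", "kalimba", "kalimba2", "kalimba3", "kalimba4", "kalimba5", "marimba", "vibraphone", "vibraphone_bowed", "vibraphone_soft", "xylophone_hard_ff", "xylophone_hard_pp", "xylophone_medium_ff", "xylophone_medium_pp", "xylophone_soft_ff", "xylophone_soft_pp"]),
  ("Keyboards", ["casio", "clavisynth", "fmpiano", "kawai", "piano", "piano1", "steinway"]),
  ("Organs", ["organ_4inch", "organ_8inch", "organ_full", "pipeorgan_loud", "pipeorgan_loud_pedal", "pipeorgan_quiet", "pipeorgan_quiet_pedal"]),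
  ("Strings", ["folkharp", "harp", "psaltery_bow", "psaltery_pluck", "psaltery_spiccato", "strumstick"]),
  ("Wind Instruments", ["didgeridoo", "harmonica", "harmonica_soft", "harmonica_vib", "ocarina", "ocarina_small", "ocarina_small_stacc", "ocarina_vib", "recorder_alto_stacc", "recorder_alto_sus", "recorder_alto_vib", "recorder_bass_stacc", "recorder_bass_sus", "recorder_bass_vib", "recorder_soprano_stacc", "recorder_soprano_sus", "recorder_tenor_stacc", "recorder_tenor_sus", "recorder_tenor_vib", "sax", "sax_stacc", "sax_vib", "saxello", "saxello_stacc", "saxello_vib"]),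
  ("Ethnic/World", ["dantranh", "dantranh_tremolo", "dantranh_vibrato", "east"]),
  ("Electronic/Synth", ["super64", "super64_acc", "super64_vib"]),
  ("Sound Effects", ["crow", "insect", "oceandrum", "space", "wind", "wineglass", "wineglass_slow"]),
  ("Drum Kit", ["hihat"]),
  ("Misc", ["jazz", "metal", "num", "numbers"])
]

-- A: scan the categories in order, return the first whose sample list contains the name.
def pvScanA (name : String) : List (String × List String) → String
  | [] => "Uncategorized"
  | (c, l) :: rest => if l.contains name then c else pvScanA name rest

def categorize_sample (name : String) : String := pvScanA name pvCats

-- ===== PORT B =====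
-- B's sorted name index and its parallel category table (Source B's _NAMES / _CATS tuples).
def pvNames : List String := ["agogo",
  "anvil",
  "balafon",
  "balafon_hard",
  "balafon_soft",
  "ballwhistle",
  "bassdrum1",
  "bassdrum2",
  "belltree",
  "bongo",
  "brakedrum",
  "cabasa",
  "cajon",
  "casio",
  "clap",
  "clash",
  "clash2",
  "clave",
  "clavisynth",
  "conga",
  "cowbell",
  "crow",
  "dantranh",
  "dantranh_tremolo",
  "dantranh_vibrato",
  "darbuka",
  "didgeridoo",
  "east",
  "fingercymbal",
  "flexatone",
  "fmpiano",
  "folkharp",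
  "framedrum",
  "glockenspiel",
  "gong",
  "gong2",
  "guiro",
  "handbells",
  "handchimes",
  "harmonica",
  "harmonica_soft",
  "harmonica_vib",
  "harp",
  "hihat",
  "insect",
  "jazz",
  "kalimba",
  "kalimba2",
  "kalimba3",
  "kalimba4",
  "kalimba5",
  "kawai",
  "marimba",
  "marktrees",
  "metal",
  "num",
  "numbers",
  "ocarina",
  "ocarina_small",
  "ocarina_small_stacc",
  "ocarina_vib",
  "oceandrum",
  "organ_4inch",
  "organ_8inch",
  "organ_full",
  "piano",
  "piano1",
  "pipeorgan_loud",
  "pipeorgan_loud_pedal",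
  "pipeorgan_quiet",
  "pipeorgan_quiet_pedal",
  "psaltery_bow",
  "psaltery_pluck",
  "psaltery_spiccato",
  "ratchet",
  "recorder_alto_stacc",
  "recorder_alto_sus",
  "recorder_alto_vib",
  "recorder_bass_stacc",
  "recorder_bass_sus",
  "recorder_bass_vib",
  "recorder_soprano_stacc",
  "recorder_soprano_sus",
  "recorder_tenor_stacc",
  "recorder_tenor_sus",
  "recorder_tenor_vib",
  "sax",
  "sax_stacc",
  "sax_vib",
  "saxello",
  "saxello_stacc",
  "saxello_vib",
  "shaker_large",
  "shaker_small",
  "siren",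
  "slapstick",
  "sleighbells",
  "slitdrum",
  "snare_hi",
  "snare_low",
  "snare_modern",
  "snare_rim",
  "space",
  "steinway",
  "strumstick",
  "super64",
  "super64_acc",
  "super64_vib",
  "sus_cymbal",
  "sus_cymbal2",
  "tambourine",
  "tambourine2",
  "timpani",
  "timpani2",
  "timpani_roll",
  "tom2_mallet",
  "tom2_rim",
  "tom2_stick",
  "tom_mallet",
  "tom_rim",
  "tom_stick",
  "trainwhistle",
  "triangles",
  "tubularbells",
  "tubularbells2",
  "vibraphone",
  "vibraphone_bowed",
  "vibraphone_soft",
  "vibraslap",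
  "wind",
  "wineglass",
  "wineglass_slow",
  "woodblock",
  "xylophone_hard_ff",
  "xylophone_hard_pp",
  "xylophone_medium_ff",
  "xylophone_medium_pp",
  "xylophone_soft_ff",
  "xylophone_soft_pp"]

def pvCatsB : List String := ["Percussion",
  "Percussion",
  "Mallet Instruments",
  "Mallet Instruments",
  "Mallet Instruments",
  "Percussion",
  "Percussion",
  "Percussion",
  "Percussion",
  "Percussion",
  "Percussion",
  "Percussion",
  "Percussion",
  "Keyboards",
  "Percussion",
  "Percussion",
  "Percussion",
  "Percussion",
  "Keyboards",
  "Percussion",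
  "Percussion",
  "Sound Effects",
  "Ethnic/World",
  "Ethnic/World",
  "Ethnic/World",
  "Percussion",
  "Wind Instruments",
  "Ethnic/World",
  "Percussion",
  "Percussion",
  "Keyboards",
  "Strings",
  "Percussion",
  "Mallet Instruments",
  "Percussion",
  "Percussion",
  "Percussion",
  "Percussion",
  "Percussion",
  "Wind Instruments",
  "Wind Instruments",
  "Wind Instruments",
  "Strings",
  "Drum Kit",
  "Sound Effects",
  "Misc",
  "Mallet Instruments",
  "Mallet Instruments",
  "Mallet Instruments",
  "Mallet Instruments",
  "Mallet Instruments",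
  "Keyboards",
  "Mallet Instruments",
  "Percussion",
  "Misc",
  "Misc",
  "Misc",
  "Wind Instruments",
  "Wind Instruments",
  "Wind Instruments",
  "Wind Instruments",
  "Sound Effects",
  "Organs",
  "Organs",
  "Organs",
  "Keyboards",
  "Keyboards",
  "Organs",
  "Organs",
  "Organs",
  "Organs",
  "Strings",
  "Strings",
  "Strings",
  "Percussion",
  "Wind Instruments",
  "Wind Instruments",
  "Wind Instruments",
  "Wind Instruments",
  "Wind Instruments",
  "Wind Instruments",
  "Wind Instruments",
  "Wind Instruments",
  "Wind Instruments",
  "Wind Instruments",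
  "Wind Instruments",
  "Wind Instruments",
  "Wind Instruments",
  "Wind Instruments",
  "Wind Instruments",
  "Wind Instruments",
  "Wind Instruments",
  "Percussion",
  "Percussion",
  "Percussion",
  "Percussion",
  "Percussion",
  "Percussion",
  "Percussion",
  "Percussion",
  "Percussion",
  "Percussion",
  "Sound Effects",
  "Keyboards",
  "Strings",
  "Electronic/Synth",
  "Electronic/Synth",
  "Electronic/Synth",
  "Percussion",
  "Percussion",
  "Percussion",
  "Percussion",
  "Percussion",
  "Percussion",
  "Percussion",
  "Percussion",
  "Percussion",
  "Percussion",
  "Percussion",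
  "Percussion",
  "Percussion",
  "Percussion",
  "Percussion",
  "Percussion",
  "Percussion",
  "Mallet Instruments",
  "Mallet Instruments",
  "Mallet Instruments",
  "Percussion",
  "Sound Effects",
  "Sound Effects",
  "Sound Effects",
  "Percussion",
  "Mallet Instruments",
  "Mallet Instruments",
  "Mallet Instruments",
  "Mallet Instruments",
  "Mallet Instruments",
  "Mallet Instruments"]

-- the while-loop of Source B: lo/hi are Python ints that stay in 0..len(_NAMES), so Nat carries the same values
-- ((lo+hi)//2 on nonnegative ints is Nat division); _NAMES[mid] is in range (lo ≤ mid < hi ≤ len), so getD is exact.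
-- fuel = hi - lo bounds the iterations (each step shrinks hi - lo), keeping the recursion structural
def pvBisectGo (name : String) : Nat → Nat → Nat → Nat
  | 0, lo, _ => lo
  | fuel + 1, lo, hi =>
    if lo < hi then
      let mid := (lo + hi) / 2
      -- _NAMES[mid] < name: Python's str '<' is code-point lexicographic = PySem.Chars.strLt on the char lists
      if PySem.Chars.strLt (pvNames.getD mid "").toList name.toList then pvBisectGo name fuel (mid + 1) hi
      else pvBisectGo name fuel lo mid
    else lo

def pvBisect (name : String) (lo hi : Nat) : Nat := pvBisectGo name (hi - lo) lo hi

def categorize_sample_alt (name : String) : String :=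
  let lo := pvBisect name 0 pvNames.length
  if lo < pvNames.length then
    if pvNames.getD lo "" == name then pvCatsB.getD lo "Uncategorized"
    else "Uncategorized"
  else "Uncategorized"

-- ===== PRECONDITION & SPEC =====
def Spec_categorize_sample (name : String) (out : String) : Prop := out = categorize_sample_alt name
instance (name : String) (out : String) : Decidable (Spec_categorize_sample name out) := by unfold Spec_categorize_sample; infer_instance

-- ===== CLAIM =====
def Claim_equal_categorize_sample : Prop := ∀ (name : String), Dom_categorize_sample name → Spec_categorize_sample name (categorize_sample name)

-- ===== LEMMAS AND PROOFS =====

-- names outside every category list make A's scan fall through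
theorem pvScanA_of_not_mem (name : String) (cats : List (String × List String))
    (h : ∀ cl ∈ cats, name ∉ cl.2) : pvScanA name cats = "Uncategorized" := by
  induction cats with
  | nil => rfl
  | cons cl rest ih =>
    obtain ⟨c, l⟩ := cl
    have hn : name ∉ l := h (c, l) (List.mem_cons_self ..)
    simp only [pvScanA]
    rw [if_neg (by simpa using hn)]
    exact ih (fun cl hcl => h cl (List.mem_cons_of_mem _ hcl))

-- every name in A's table occurs in B's sorted index
theorem pvCats_covered : ∀ cl ∈ pvCats, ∀ x ∈ cl.2, x ∈ pvNames := by decide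

-- outside the index, B's final equality test can never fire
theorem pvAlt_of_not_mem (name : String) (h : name ∉ pvNames) :
    categorize_sample_alt name = "Uncategorized" := by
  unfold categorize_sample_alt
  by_cases hlo : pvBisect name 0 pvNames.length < pvNames.length
  · simp only [hlo, if_true]
    rw [if_neg]
    intro heq
    apply h
    have := List.getD_eq_getElem pvNames "" hlo
    rw [this] at heq
    exact (eq_of_beq heq) ▸ List.getElem_mem hlo
  · simp [hlo]

-- on the 139 indexed names the two programs agree (finite check)
set_option maxRecDepth 100000 in
theorem pvAgree_on_names : ∀ x ∈ pvNames, pvScanA x pvCats = categorize_sample_alt x := by decide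

-- ===== VERDICT =====
theorem categorize_sample_spec : Claim_equal_categorize_sample := by
  intro name _
  show categorize_sample name = categorize_sample_alt name
  unfold categorize_sample
  by_cases h : name ∈ pvNames
  · exact pvAgree_on_names name h
  · rw [pvScanA_of_not_mem name pvCats
      (fun cl hcl hx => h (pvCats_covered cl hcl name hx)), pvAlt_of_not_mem name h]
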